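-- pv_equiv track=rewrite | github.com/Shirochi-stack/Glossarion | src/GlossaryManager.py | _count_glossary_entries
-- ===== SOURCE A (Python) =====
-- def _count_glossary_entries(lines, use_legacy_format=False):
--     """Return (char_count, term_count, total_count) for either format."""
--     if not lines:
--         return 0, 0, 0
--     if use_legacy_format:
--         data = lines[1:] if lines and lines[0].lower().startswith('type,raw_name') else lines
--         char_count = sum(1 for ln in data if ln.startswith('character,'))
--         term_count = sum(1 for ln in data if ln.startswith('term,'))
--         total = sum(1 for ln in data if ln and ',' in ln)
--         return char_count, term_count, total
--     # token-efficient
--     current = None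
--     char_count = term_count = total = 0
--     for ln in lines:
--         s = ln.strip()
--         if s.startswith('=== ') and 'CHARACTER' in s.upper():
--             current = 'character'
--             continue
--         if s.startswith('=== ') and 'TERM' in s.upper():
--             current = 'term'
--             continue
--         if s.startswith('* '):
--             total += 1
--             if current == 'character':
--                 char_count += 1
--             elif current == 'term':
--                 term_count += 1
--     return char_count, term_count, total
-- ===== SOURCE B (Python) =====
-- def _count_glossary_entries(lines, use_legacy_format=False):
--     """Return (char_count, term_count, total_count) for either format."""
--     if not lines:
--         return 0, 0, 0
--     if use_legacy_format:
--         # classify each CSV line once by its first field instead of three prefix scans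
--         data = lines[1:] if lines[0].lower().startswith('type,raw_name') else lines
--         char_count = term_count = total = 0
--         for ln in data:
--             if ',' in ln:
--                 total += 1
--                 head = ln[:ln.index(',')]
--                 if head == 'character':
--                     char_count += 1
--                 elif head == 'term':
--                     term_count += 1
--         return char_count, term_count, total
--     # scan backwards: bullets stay pending until the header that owns them is met
--     char_count = term_count = total = pending = 0
--     for ln in reversed(lines):
--         s = ln.strip()
--         if s.startswith('=== ') and 'CHARACTER' in s.upper():
--             char_count += pending
--             pending = 0
--         elif s.startswith('=== ') and 'TERM' in s.upper():
--             term_count += pending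
--             pending = 0
--         elif s.startswith('* '):
--             total += 1
--             pending += 1
--     return char_count, term_count, total
-- ===== Notes on version B (the rewrite author's own statement) =====
-- stated objective: alternative
-- what changed: The legacy branch replaces the three separate prefix-scan sums with one pass that splits each line at its first comma and classifies the extracted first field by equality; the section branch is replaced by a reversed scan that keeps bullets in a pending counter and attributes them to the first section header met while walking backwards, instead of carrying a current-section state forwards.
import Mathlib
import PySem

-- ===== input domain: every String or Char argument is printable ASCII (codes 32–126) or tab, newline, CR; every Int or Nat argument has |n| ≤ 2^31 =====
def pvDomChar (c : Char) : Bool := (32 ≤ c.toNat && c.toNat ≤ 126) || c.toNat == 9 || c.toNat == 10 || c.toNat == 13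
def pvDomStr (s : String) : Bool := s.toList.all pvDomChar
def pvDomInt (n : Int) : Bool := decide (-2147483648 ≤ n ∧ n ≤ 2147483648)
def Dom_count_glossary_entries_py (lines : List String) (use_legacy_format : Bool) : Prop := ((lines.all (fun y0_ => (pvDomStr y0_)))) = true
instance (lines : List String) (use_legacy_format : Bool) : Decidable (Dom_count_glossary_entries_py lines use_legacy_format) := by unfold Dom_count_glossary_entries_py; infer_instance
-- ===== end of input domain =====

-- B classifies each legacy CSV line once by its first comma-field and counts the section-format
-- bullets with a reversed scan and a pending counter; objective: alternative (same cost).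

-- ===== PORT A =====
-- one step of A's section for-loop (state: current, char_count, term_count, total)
def pvAStep (st : Option String × Int × Int × Int) (ln : String) : Option String × Int × Int × Int :=
  let (current, c, t, tot) := st
  let s := PySem.Str.strip ln
  if PySem.Str.startswith s "=== " && PySem.Str.isIn "CHARACTER" (PySem.Str.upper s) then
    (some "character", c, t, tot)
  else if PySem.Str.startswith s "=== " && PySem.Str.isIn "TERM" (PySem.Str.upper s) then
    (some "term", c, t, tot)
  else if PySem.Str.startswith s "* " then
    (current, (if current = some "character" then c + 1 else c),
      (if current = some "term" then t + 1 else t), tot + 1)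
  else (current, c, t, tot)

def count_glossary_entries_py (lines : List String) (use_legacy_format : Bool) : Int × Int × Int :=
  if lines.isEmpty then (0, 0, 0)
  else if use_legacy_format then
    let data := if !lines.isEmpty && PySem.Str.startswith (PySem.Str.lower (lines.headD "")) "type,raw_name"
                then PySem.List.slice lines (some 1) none else lines
    let char_count := data.foldl (fun a ln => if PySem.Str.startswith ln "character," then a + 1 else a) (0 : Int)
    let term_count := data.foldl (fun a ln => if PySem.Str.startswith ln "term," then a + 1 else a) (0 : Int)
    let total := data.foldl (fun a ln => if ln ≠ "" && PySem.Str.isIn "," ln then a + 1 else a) (0 : Int)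
    (char_count, term_count, total)
  else
    let st := lines.foldl pvAStep (none, 0, 0, 0)
    (st.2.1, st.2.2.1, st.2.2.2)

-- ===== PORT B =====
-- one step of B's legacy loop: split at the first comma, classify the first field by equality
def pvBLegacyStep (acc : Int × Int × Int) (ln : String) : Int × Int × Int :=
  let (c, t, tot) := acc
  if PySem.Str.isIn "," ln then
    let tot := tot + 1
    let head := PySem.Str.slice ln none (some (PySem.Str.find ln ","))  -- ln[:ln.index(',')]
    if head = "character" then (c + 1, t, tot)
    else if head = "term" then (c, t + 1, tot)
    else (c, t, tot)
  else (c, t, tot)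

-- one step of B's reversed section loop (state: char_count, term_count, total, pending)
def pvBStep (st : Int × Int × Int × Int) (ln : String) : Int × Int × Int × Int :=
  let (c, t, tot, p) := st
  let s := PySem.Str.strip ln
  if PySem.Str.startswith s "=== " && PySem.Str.isIn "CHARACTER" (PySem.Str.upper s) then
    (c + p, t, tot, 0)
  else if PySem.Str.startswith s "=== " && PySem.Str.isIn "TERM" (PySem.Str.upper s) then
    (c, t + p, tot, 0)
  else if PySem.Str.startswith s "* " then
    (c, t, tot + 1, p + 1)
  else (c, t, tot, p)

def count_glossary_entries_py_alt (lines : List String) (use_legacy_format : Bool) : Int × Int × Int :=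
  if lines.isEmpty then (0, 0, 0)
  else if use_legacy_format then
    let data := if PySem.Str.startswith (PySem.Str.lower (lines.headD "")) "type,raw_name"
                then PySem.List.slice lines (some 1) none else lines
    data.foldl pvBLegacyStep (0, 0, 0)
  else
    let st := lines.reverse.foldl pvBStep (0, 0, 0, 0)  -- for ln in reversed(lines)
    (st.1, st.2.1, st.2.2.1)

-- ===== PRECONDITION & SPEC =====
def Spec_count_glossary_entries_py (lines : List String) (use_legacy_format : Bool) (out : Int × Int × Int) : Prop := out = count_glossary_entries_py_alt lines use_legacy_format
instance (lines : List String) (use_legacy_format : Bool) (out : Int × Int × Int) : Decidable (Spec_count_glossary_entries_py lines use_legacy_format out) := by unfold Spec_count_glossary_entries_py; infer_instance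

-- ===== CLAIM (what is proved, stated in full; the proofs are below) =====
def Claim_equal_count_glossary_entries_py : Prop := ∀ (lines : List String) (use_legacy_format : Bool), Dom_count_glossary_entries_py lines use_legacy_format → Spec_count_glossary_entries_py lines use_legacy_format (count_glossary_entries_py lines use_legacy_format)

-- ===== LEMMAS AND PROOFS =====

-- a singleton list is an infix exactly of the lists containing its element
theorem pv_singleton_infix (a : Char) (l : List Char) : [a] <:+: l ↔ a ∈ l := by
  constructor
  · intro h; exact h.mem (List.mem_singleton_self a)
  · intro h; obtain ⟨x, y, rfl⟩ := List.mem_iff_append.mp h; exact ⟨x, y, by simp⟩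

-- ',' in ln, as Python tests it, is membership of ',' in the character list
theorem pv_isIn_comma (ln : String) : PySem.Str.isIn "," ln = true ↔ ',' ∈ ln.toList := by
  rw [PySem.Str.isIn_iff_infix]
  exact pv_singleton_infix ',' ln.toList

-- str.find for a single-character needle counts the comma-free prefix
theorem pv_find_go_comma (cs : List Char) (k : Nat) (h : ',' ∈ cs) :
    PySem.Chars.find.go [','] cs k = ((k + (cs.takeWhile (· ≠ ',')).length : Nat) : Int) := by
  induction cs generalizing k with
  | nil => cases h
  | cons c rest ih =>
    by_cases hc : c = ','
    · subst hc
      simp [PySem.Chars.find.go, List.isPrefixOf]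
    · have hmem : ',' ∈ rest := by
        rcases List.mem_cons.mp h with h' | h'
        · exact absurd h'.symm hc
        · exact h'
      have hpre : [','].isPrefixOf (c :: rest) = false := by
        simp [List.isPrefixOf]; exact fun h' => absurd h'.symm hc
      rw [show PySem.Chars.find.go [','] (c :: rest) k = PySem.Chars.find.go [','] rest (k + 1) by
            simp [PySem.Chars.find.go, hpre]]
      rw [ih (k + 1) hmem]
      have : (c :: rest).takeWhile (· ≠ ',') = c :: rest.takeWhile (· ≠ ',') := by
        simp [List.takeWhile_cons, hc]
      rw [this]
      simp; omega

theorem pv_find_comma (ln : String) (h : ',' ∈ ln.toList) :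
    PySem.Str.find ln "," = (((ln.toList.takeWhile (· ≠ ',')).length : Nat) : Int) := by
  have : PySem.Str.find ln "," = PySem.Chars.find ln.toList [','] := rfl
  rw [this, PySem.Chars.find]
  simpa using pv_find_go_comma ln.toList 0 h

-- the slice ln[:ln.index(',')] is the comma-free prefix
theorem pv_head_comma (ln : String) (h : ',' ∈ ln.toList) :
    (PySem.Str.slice ln none (some (PySem.Str.find ln ","))).toList
      = ln.toList.takeWhile (· ≠ ',') := by
  rw [pv_find_comma ln h]
  have : PySem.Str.slice ln none (some ((((ln.toList.takeWhile (· ≠ ',')).length : Nat)) : Int))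
      = String.ofList (PySem.List.slice ln.toList none (some (((ln.toList.takeWhile (· ≠ ',')).length : Nat) : Int))) := rfl
  rw [this, PySem.List.slice_to _ (by positivity)]
  have hpre : ln.toList.takeWhile (· ≠ ',') <+: ln.toList := List.takeWhile_prefix _
  have : ln.toList.take ((ln.toList.takeWhile (· ≠ ',')).length) = ln.toList.takeWhile (· ≠ ',') :=
    (List.prefix_iff_eq_take.mp hpre).symm
  simp only [ne_eq, decide_not] at this ⊢
  simp [pysem, this]

-- startswith (tag ++ ",") is: has a comma, and the comma-free prefix equals tag
theorem pv_startswith_tag (cs tag : List Char) (hno : ',' ∉ tag) :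
    PySem.Chars.startswith cs (tag ++ [',']) = true ↔
      (',' ∈ cs ∧ cs.takeWhile (· ≠ ',') = tag) := by
  induction tag generalizing cs with
  | nil =>
    cases cs with
    | nil => simp [PySem.Chars.startswith, List.isPrefixOf]
    | cons c r =>
      by_cases hc : c = ','
      · subst hc; simp [PySem.Chars.startswith, List.isPrefixOf, List.takeWhile_cons]
      · simp [PySem.Chars.startswith, List.isPrefixOf, List.takeWhile_cons, hc]
        intro h; exact absurd h.symm hc
  | cons a tag' ih =>
    have hano : a ≠ ',' := fun h => hno (h ▸ List.mem_cons_self)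
    have hno' : ',' ∉ tag' := fun h => hno (List.mem_cons_of_mem _ h)
    cases cs with
    | nil => simp [PySem.Chars.startswith, List.isPrefixOf]
    | cons c r =>
      by_cases hca : c = a
      · subst hca
        rw [show PySem.Chars.startswith (c :: r) ((c :: tag') ++ [',']) = PySem.Chars.startswith r (tag' ++ [',']) from by
              simp [PySem.Chars.startswith, List.isPrefixOf]]
        rw [ih r hno']
        constructor
        · rintro ⟨h1, h2⟩
          refine ⟨List.mem_cons_of_mem _ h1, ?_⟩
          simp only [ne_eq, decide_not] at h2 ⊢
          simp [List.takeWhile_cons, hano, h2]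
        · rintro ⟨h1, h2⟩
          refine ⟨?_, ?_⟩
          · rcases List.mem_cons.mp h1 with h' | h'
            · exact absurd h'.symm hano
            · exact h'
          · simp only [ne_eq, decide_not] at h2 ⊢
            simp [List.takeWhile_cons, hano] at h2
            exact h2
      · constructor
        · intro h
          exfalso
          simp [PySem.Chars.startswith, List.isPrefixOf] at h
          exact hca h.1.symm
        · rintro ⟨h1, h2⟩
          exfalso
          by_cases hc : c = ','
          · rw [List.takeWhile_cons] at h2; simp [hc] at h2
          · rw [List.takeWhile_cons] at h2
            simp [hc] at h2
            exact hca h2.1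

-- A's three legacy tests on one line agree with B's split-and-classify step
theorem pv_legacy_step (ln : String) (a b c : Int) :
    ((if PySem.Str.startswith ln "character," then a + 1 else a,
      if PySem.Str.startswith ln "term," then b + 1 else b,
      if ln ≠ "" && PySem.Str.isIn "," ln then c + 1 else c) : Int × Int × Int)
      = pvBLegacyStep (a, b, c) ln := by
  simp only [pvBLegacyStep]
  by_cases hin : PySem.Str.isIn "," ln = true
  · have hmem : ',' ∈ ln.toList := (pv_isIn_comma ln).mp hin
    have hnil : ln.toList ≠ [] := List.ne_nil_of_mem hmem
    have hne : ln ≠ "" := fun h => hnil (by rw [h]; rfl)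
    have hH := pv_head_comma ln hmem
    have hchar : PySem.Str.startswith ln "character," = true ↔
        ln.toList.takeWhile (· ≠ ',') = "character".toList := by
      rw [show PySem.Str.startswith ln "character,"
            = PySem.Chars.startswith ln.toList ("character".toList ++ [',']) from rfl,
          pv_startswith_tag _ _ (by decide)]
      simp [hmem]
    have hterm : PySem.Str.startswith ln "term," = true ↔
        ln.toList.takeWhile (· ≠ ',') = "term".toList := by
      rw [show PySem.Str.startswith ln "term,"
            = PySem.Chars.startswith ln.toList ("term".toList ++ [',']) from rfl,
          pv_startswith_tag _ _ (by decide)]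
      simp [hmem]
    have hheadc : (PySem.Str.slice ln none (some (PySem.Str.find ln ",")) = "character") ↔
        ln.toList.takeWhile (· ≠ ',') = "character".toList := by
      rw [← hH]
      exact ⟨fun h => h ▸ rfl, fun h => String.toList_injective h⟩
    have hheadt : (PySem.Str.slice ln none (some (PySem.Str.find ln ",")) = "term") ↔
        ln.toList.takeWhile (· ≠ ',') = "term".toList := by
      rw [← hH]
      exact ⟨fun h => h ▸ rfl, fun h => String.toList_injective h⟩
    have hgate : (decide (¬ ln = "") && PySem.Str.isIn "," ln) = true := by
      simp only [Bool.and_eq_true]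
      exact ⟨by simp [hne], hin⟩
    rw [if_pos hin, if_pos hgate]
    by_cases h1 : ln.toList.takeWhile (· ≠ ',') = "character".toList
    · have h2 : ¬ ln.toList.takeWhile (· ≠ ',') = "term".toList := by
        rw [h1]; decide
      rw [if_pos (hchar.mpr h1), if_neg (fun h => h2 (hterm.mp h)),
          if_pos (hheadc.mpr h1)]
    · by_cases h2 : ln.toList.takeWhile (· ≠ ',') = "term".toList
      · rw [if_neg (fun h => h1 (hchar.mp h)), if_pos (hterm.mpr h2),
            if_neg (fun h => h1 (hheadc.mp h)), if_pos (hheadt.mpr h2)]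
      · rw [if_neg (fun h => h1 (hchar.mp h)), if_neg (fun h => h2 (hterm.mp h)),
            if_neg (fun h => h1 (hheadc.mp h)), if_neg (fun h => h2 (hheadt.mp h))]
  · have hmem : ',' ∉ ln.toList := fun h => hin ((pv_isIn_comma ln).mpr h)
    have hchar : ¬ PySem.Str.startswith ln "character," = true := fun h =>
      hmem (((pv_startswith_tag ln.toList "character".toList (by decide)).mp h).1)
    have hterm : ¬ PySem.Str.startswith ln "term," = true := fun h =>
      hmem (((pv_startswith_tag ln.toList "term".toList (by decide)).mp h).1)
    have hgate : ¬ (decide (¬ ln = "") && PySem.Str.isIn "," ln) = true := by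
      simp_all
    rw [if_neg hin, if_neg hchar, if_neg hterm, if_neg hgate]

-- the three legacy folds of A equal B's single split-and-classify fold
theorem pv_legacy (data : List String) : ∀ (a b c : Int),
    ((data.foldl (fun a ln => if PySem.Str.startswith ln "character," then a + 1 else a) a,
      data.foldl (fun a ln => if PySem.Str.startswith ln "term," then a + 1 else a) b,
      data.foldl (fun a ln => if ln ≠ "" && PySem.Str.isIn "," ln then a + 1 else a) c) : Int × Int × Int)
      = data.foldl pvBLegacyStep (a, b, c) := by
  induction data with
  | nil => intro a b c; rfl
  | cons ln rest ih =>
    intro a b c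
    simp only [List.foldl_cons]
    rw [show pvBLegacyStep (a, b, c) ln
          = ((if PySem.Str.startswith ln "character," then a + 1 else a,
              if PySem.Str.startswith ln "term," then b + 1 else b,
              if ln ≠ "" && PySem.Str.isIn "," ln then c + 1 else c) : Int × Int × Int) from
        (pv_legacy_step ln a b c).symm]
    exact ih _ _ _

-- A's forward section scan equals B's reversed pending-counter scan, for any starting
-- section and count offsets: the leftover pending bullets are exactly those A would
-- attribute to the incoming `cur`.
theorem pv_section (lines : List String) : ∀ (cur : Option String) (c0 t0 tot0 : Int),
    (lines.foldl pvAStep (cur, c0, t0, tot0)).2 =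
      (c0 + (lines.foldr (fun ln acc => pvBStep acc ln) ((0:Int),(0:Int),(0:Int),(0:Int))).1
          + (if cur = some "character" then (lines.foldr (fun ln acc => pvBStep acc ln) ((0:Int),(0:Int),(0:Int),(0:Int))).2.2.2 else 0),
       t0 + (lines.foldr (fun ln acc => pvBStep acc ln) ((0:Int),(0:Int),(0:Int),(0:Int))).2.1
          + (if cur = some "term" then (lines.foldr (fun ln acc => pvBStep acc ln) ((0:Int),(0:Int),(0:Int),(0:Int))).2.2.2 else 0),
       tot0 + (lines.foldr (fun ln acc => pvBStep acc ln) ((0:Int),(0:Int),(0:Int),(0:Int))).2.2.1) := by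
  induction lines with
  | nil =>
    intro cur c0 t0 tot0
    show (cur, c0, t0, tot0).2 = _
    simp only [List.foldr_nil, ite_self]
    show (c0, t0, tot0) = (c0 + 0 + 0, t0 + 0 + 0, tot0 + 0)
    simp only [Prod.mk.injEq]
    omega
  | cons ln rest ih =>
    intro cur c0 t0 tot0
    rw [List.foldl_cons, List.foldr_cons]
    rcases hR : rest.foldr (fun ln acc => pvBStep acc ln) ((0:Int),(0:Int),(0:Int),(0:Int)) with ⟨rc, rt, rtot, rp⟩
    rw [hR] at ih
    by_cases hC : (PySem.Str.startswith (PySem.Str.strip ln) "=== " &&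
        PySem.Str.isIn "CHARACTER" (PySem.Str.upper (PySem.Str.strip ln))) = true
    · rw [show pvAStep (cur, c0, t0, tot0) ln = (some "character", c0, t0, tot0) from by
            simp only [pvAStep]; rw [if_pos hC],
          show pvBStep (rc, rt, rtot, rp) ln = (rc + rp, rt, rtot, 0) from by
            simp only [pvBStep]; rw [if_pos hC]]
      rw [ih (some "character") c0 t0 tot0]
      simp only [Prod.mk.injEq]
      split_ifs <;> simp_all <;> omega
    · by_cases hT : (PySem.Str.startswith (PySem.Str.strip ln) "=== " &&
          PySem.Str.isIn "TERM" (PySem.Str.upper (PySem.Str.strip ln))) = true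
      · rw [show pvAStep (cur, c0, t0, tot0) ln = (some "term", c0, t0, tot0) from by
              simp only [pvAStep]; rw [if_neg (by simp_all), if_pos hT],
            show pvBStep (rc, rt, rtot, rp) ln = (rc, rt + rp, rtot, 0) from by
              simp only [pvBStep]; rw [if_neg (by simp_all), if_pos hT]]
        rw [ih (some "term") c0 t0 tot0]
        simp only [Prod.mk.injEq]
        split_ifs <;> simp_all <;> omega
      · by_cases hS : PySem.Str.startswith (PySem.Str.strip ln) "* " = true
        · rw [show pvAStep (cur, c0, t0, tot0) ln
                = (cur, (if cur = some "character" then c0 + 1 else c0),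
                   (if cur = some "term" then t0 + 1 else t0), tot0 + 1) from by
                simp only [pvAStep]; rw [if_neg (by simp_all), if_neg (by simp_all), if_pos hS],
              show pvBStep (rc, rt, rtot, rp) ln = (rc, rt, rtot + 1, rp + 1) from by
                simp only [pvBStep]; rw [if_neg (by simp_all), if_neg (by simp_all), if_pos hS]]
          rw [ih cur _ _ _]
          simp only [Prod.mk.injEq]
          split_ifs <;> simp_all <;> omega
        · rw [show pvAStep (cur, c0, t0, tot0) ln = (cur, c0, t0, tot0) from by
                simp only [pvAStep]
                rw [if_neg (by simp_all), if_neg (by simp_all), if_neg (by simp_all)],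
              show pvBStep (rc, rt, rtot, rp) ln = (rc, rt, rtot, rp) from by
                simp only [pvBStep]
                rw [if_neg (by simp_all), if_neg (by simp_all), if_neg (by simp_all)]]
          rw [ih cur _ _ _]

-- ===== VERDICT (by name: the statement is the Claim_ definition above) =====
theorem count_glossary_entries_py_spec : Claim_equal_count_glossary_entries_py := by
  intro lines use_legacy_format _
  unfold Spec_count_glossary_entries_py count_glossary_entries_py count_glossary_entries_py_alt
  by_cases hnil : lines.isEmpty = true
  · simp [hnil]
  · rw [Bool.not_eq_true] at hnil
    simp only [hnil, Bool.false_eq_true, if_false, Bool.not_false, Bool.true_and]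
    cases use_legacy_format with
    | true =>
      simp only [if_pos]
      exact pv_legacy _ 0 0 0
    | false =>
      simp only [Bool.false_eq_true, if_false]
      rw [List.foldl_reverse]
      have := pv_section lines none 0 0 0
      rw [this]
      rcases lines.foldr (fun ln acc => pvBStep acc ln) ((0:Int),(0:Int),(0:Int),(0:Int)) with ⟨rc, rt, rtot, rp⟩
      simp
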